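-- pv_equiv track=rewrite | github.com/xsmilebook/data_driven_EF | app_data_proc/task_analysis_run.py | count_subjects_with_all_tasks
-- ===== SOURCE A (Python) =====
-- def count_subjects_with_all_tasks(task_subjects, excluded_tasks=None):
--     """Count subjects who have all tasks, optionally excluding some tasks."""
--     excluded = set(excluded_tasks or [])
--     task_sets = [subjects for task, subjects in task_subjects.items() if task not in excluded]
--
--     if not task_sets:
--         return 0
--
--     common_subjects = set(task_sets[0])
--     for subject_set in task_sets[1:]:
--         common_subjects &= subject_set
--
--     return len(common_subjects)
-- ===== SOURCE B (Python) =====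
-- def count_subjects_with_all_tasks(task_subjects, excluded_tasks=None):
--     """Count subjects who have all tasks, optionally excluding some tasks."""
--     excluded = set(excluded_tasks or [])
--     n = 0
--     counts = {}
--     for task, subjects in task_subjects.items():
--         if task not in excluded:
--             n += 1
--             for s in set(subjects):
--                 counts[s] = counts.get(s, 0) + 1
--     if n == 0:
--         return 0
--     return sum(1 for c in counts.values() if c == n)
-- ===== Notes on version B (the rewrite author's own statement) =====
-- stated objective: alternative
-- what changed: Replaces the repeated set-intersection over task subject sets by a single tally pass: count in how many non-excluded tasks each subject occurs, then count the subjects whose tally equals the number of non-excluded tasks.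
import Mathlib
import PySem

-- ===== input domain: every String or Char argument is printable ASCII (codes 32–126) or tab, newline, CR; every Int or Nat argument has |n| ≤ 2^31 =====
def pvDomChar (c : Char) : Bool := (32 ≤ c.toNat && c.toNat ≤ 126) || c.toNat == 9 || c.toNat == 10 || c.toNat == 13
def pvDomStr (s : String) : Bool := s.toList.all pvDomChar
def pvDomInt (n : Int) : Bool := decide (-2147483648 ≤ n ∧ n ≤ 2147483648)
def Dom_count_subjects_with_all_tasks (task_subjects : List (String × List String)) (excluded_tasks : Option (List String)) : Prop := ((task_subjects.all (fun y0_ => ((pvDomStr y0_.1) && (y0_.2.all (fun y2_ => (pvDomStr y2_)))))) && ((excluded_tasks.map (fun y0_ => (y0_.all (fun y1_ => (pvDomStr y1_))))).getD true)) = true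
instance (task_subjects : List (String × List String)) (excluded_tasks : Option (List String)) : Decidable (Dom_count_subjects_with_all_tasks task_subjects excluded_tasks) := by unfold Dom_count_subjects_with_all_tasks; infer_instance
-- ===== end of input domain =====

-- B replaces A's repeated set intersection by one tally pass (count per-subject task occurrences,
-- then count the subjects whose tally equals the number of non-excluded tasks); alternative, not faster.

-- ===== PORT A =====
-- dict[str, set[str]] is modelled as an insertion-ordered assoc list; the set values are List String
-- used through PySem.Set operations exactly where A's Python applies set operations.
def count_subjects_with_all_tasks (task_subjects : List (String × List String)) (excluded_tasks : Option (List String)) : Int :=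
  let excluded : PySem.Set String := PySem.Set.ofList (excluded_tasks.getD [])
  let task_sets : List (List String) :=
    ((PySem.Dict.ofList task_subjects).items.filter (fun p => !(excluded.contains p.1))).map (fun p => p.2)
  match task_sets with
  | [] => 0
  | t0 :: rest =>
    let common := rest.foldl (fun acc s => PySem.Set.inter acc s) (PySem.Set.ofList t0)
    PySem.Set.len common

-- ===== PORT B =====
def count_subjects_with_all_tasks_alt (task_subjects : List (String × List String)) (excluded_tasks : Option (List String)) : Int :=
  let excluded : PySem.Set String := PySem.Set.ofList (excluded_tasks.getD [])
  let st := (PySem.Dict.ofList task_subjects).items.foldl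
      (fun (st : Int × PySem.Dict String Int) p =>
        if !(excluded.contains p.1) then
          (st.1 + 1, (PySem.Set.ofList p.2).foldl (fun d s => d.modify s 0 (· + 1)) st.2)
        else st)
      (0, PySem.Dict.empty)
  if st.1 = 0 then 0 else (st.2.values.countP (fun c => c == st.1) : Int)

-- ===== PRECONDITION & SPEC =====
def Spec_count_subjects_with_all_tasks (task_subjects : List (String × List String)) (excluded_tasks : Option (List String)) (out : Int) : Prop := out = count_subjects_with_all_tasks_alt task_subjects excluded_tasks
instance (task_subjects : List (String × List String)) (excluded_tasks : Option (List String)) (out : Int) : Decidable (Spec_count_subjects_with_all_tasks task_subjects excluded_tasks out) := by unfold Spec_count_subjects_with_all_tasks; infer_instance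

-- ===== CLAIM (what is proved, stated in full; the proofs are below) =====
def Claim_equal_count_subjects_with_all_tasks : Prop := ∀ (task_subjects : List (String × List String)) (excluded_tasks : Option (List String)), Dom_count_subjects_with_all_tasks task_subjects excluded_tasks → Spec_count_subjects_with_all_tasks task_subjects excluded_tasks (count_subjects_with_all_tasks task_subjects excluded_tasks)

-- ===== LEMMAS AND PROOFS =====

-- A's intersection loop is a filter of its starting set.
theorem foldl_inter_eq_filter (rest : List (List String)) (s : PySem.Set String) :
    rest.foldl (fun acc t => PySem.Set.inter acc t) s
      = s.filter (fun x => rest.all (fun t => t.contains x)) := by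
  induction rest generalizing s with
  | nil => simp
  | cons t rest ih =>
      rw [List.foldl_cons, show PySem.Set.inter s t = List.filter (fun x => t.contains x) s from rfl,
        ih, List.filter_filter]
      simp [List.all_cons, Bool.and_comm]

-- B's pair fold splits into a length count and a dict fold.
theorem pair_fold_split (L : List (List String)) (n : Int) (d : PySem.Dict String Int) :
    L.foldl (fun (st : Int × PySem.Dict String Int) t =>
        (st.1 + 1, (PySem.Set.ofList t).foldl (fun d s => d.modify s 0 (· + 1)) st.2)) (n, d)
      = (n + L.length,
         L.foldl (fun d t => (PySem.Set.ofList t).foldl (fun d s => d.modify s 0 (· + 1)) d) d) := by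
  induction L generalizing n d with
  | nil => simp
  | cons t L ih => simp [ih]; ring_nf

-- B's nested counting fold is the counter of the concatenated deduplicated tasks.
theorem dict_fold_eq_counter_fold (L : List (List String)) (d : PySem.Dict String Int) :
    L.foldl (fun d t => (PySem.Set.ofList t).foldl (fun d s => d.modify s 0 (· + 1)) d) d
      = (L.flatMap (fun t => PySem.Set.ofList t)).foldl (fun d s => d.modify s 0 (· + 1)) d := by
  induction L generalizing d with
  | nil => rfl
  | cons t L ih => simp [List.flatMap_cons, List.foldl_append, ih]

-- counting a subject across the deduplicated tasks counts the tasks containing it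
theorem count_flatMap_ofList (L : List (List String)) (k : String) :
    (L.flatMap (fun t => PySem.Set.ofList t)).count k
      = L.countP (fun t => t.contains k) := by
  induction L with
  | nil => rfl
  | cons t L ih =>
      simp only [List.flatMap_cons, List.count_append, ih, List.countP_cons]
      rw [List.Nodup.count (PySem.Set.nodup_ofList t)]
      by_cases h : k ∈ t <;>
        simp [PySem.Set.mem_ofList, h, Nat.add_comm]

-- the core equality, for an arbitrary list of (already filtered) task subject lists
theorem core (L : List (List String)) :
    (match L with
     | [] => (0 : Int)
     | t0 :: rest => PySem.Set.len (rest.foldl (fun acc t => PySem.Set.inter acc t) (PySem.Set.ofList t0)))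
    = (let st := L.foldl (fun (st : Int × PySem.Dict String Int) t =>
          (st.1 + 1, (PySem.Set.ofList t).foldl (fun d s => d.modify s 0 (· + 1)) st.2)) (0, PySem.Dict.empty)
       if st.1 = 0 then 0 else (st.2.values.countP (fun c => c == st.1) : Int)) := by
  rw [pair_fold_split, dict_fold_eq_counter_fold, ← PySem.Dict.counter_eq_foldl]
  cases L with
  | nil => simp
  | cons t0 rest =>
      have hlen : ((0 : Int) + ((t0 :: rest).length : Int)) ≠ 0 := by
        simp [List.length_cons]; positivity
      dsimp only
      rw [if_neg hlen, foldl_inter_eq_filter]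
      -- B's side: countP over the counter's values = countP over its (nodup) key set
      rw [PySem.Dict.values, PySem.Dict.items_counter, List.map_map, List.countP_map]
      simp only [Function.comp_def]
      set L := t0 :: rest with hL
      set xs := L.flatMap (fun t => PySem.Set.ofList t) with hxs
      rw [List.countP_eq_length_filter]
      -- both filtered lists are nodup and have the same members
      have hA : (List.filter (fun x => rest.all fun t => t.contains x) (PySem.Set.ofList t0)).Nodup :=
        (PySem.Set.nodup_ofList t0).filter _
      have hB : (List.filter (fun k => ((xs.count k : Nat) : Int) == 0 + (L.length : Int))
          (PySem.Set.ofList xs)).Nodup :=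
        (PySem.Set.nodup_ofList xs).filter _
      have hperm : (List.filter (fun k => ((xs.count k : Nat) : Int) == 0 + (L.length : Int))
            (PySem.Set.ofList xs)).Perm
          (List.filter (fun x => rest.all fun t => t.contains x) (PySem.Set.ofList t0)) := by
        rw [List.perm_ext_iff_of_nodup hB hA]
        intro a
        simp only [List.mem_filter, PySem.Set.mem_ofList, beq_iff_eq, zero_add,
          Nat.cast_inj, hxs, count_flatMap_ofList, List.all_eq_true]
        constructor
        · rintro ⟨hmem, hcnt⟩
          have hall : ∀ t ∈ L, t.contains a = true := List.countP_eq_length.mp hcnt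
          have h0 : a ∈ t0 := by
            have := hall t0 (by rw [hL]; exact List.mem_cons_self)
            simpa [List.contains_iff_mem] using this
          exact ⟨h0, fun t ht => hall t (by rw [hL]; exact List.mem_cons_of_mem _ ht)⟩
        · rintro ⟨h0, hrest⟩
          have hall : ∀ t ∈ L, t.contains a = true := by
            rw [hL]
            intro t htL
            rcases List.mem_cons.mp htL with rfl | ht
            · simpa [List.contains_iff_mem] using h0
            · exact hrest t ht
          refine ⟨?_, List.countP_eq_length.mpr hall⟩
          exact List.mem_flatMap.mpr ⟨t0, by rw [hL]; exact List.mem_cons_self,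
            (PySem.Set.mem_ofList t0 a).mpr h0⟩
      rw [hperm.length_eq, PySem.Set.len]

-- ===== VERDICT (by name: the statement is the Claim_ definition above) =====
theorem count_subjects_with_all_tasks_spec : Claim_equal_count_subjects_with_all_tasks := by
  intro ts ex _
  unfold Spec_count_subjects_with_all_tasks count_subjects_with_all_tasks count_subjects_with_all_tasks_alt
  have h := core (((PySem.Dict.ofList ts).items.filter
      (fun p => !((PySem.Set.ofList (ex.getD [])).contains p.1))).map (fun p => p.2))
  rw [List.foldl_map, List.foldl_filter] at h
  exact h
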